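-- pv_equiv track=rewrite | github.com/Confused-coder1919/Thales-optronic-video-indexing | backend/src/entity_indexing/discovery.py | _canonicalize_phrase
-- ===== SOURCE A (Python) =====
-- SYNONYM_MAP = {
--     "aircraft carrier": [
--         "carrier ship",
--         "naval carrier",
--         "carrier vessel",
--         "aircraft-carrier",
--     ],
--     "warship": [
--         "naval ship",
--         "military ship",
--         "destroyer",
--         "frigate",
--         "battleship",
--     ],
--     "fighter jet": [
--         "fighter",
--         "fighter aircraft",
--         "combat aircraft",
--     ],
--     "military helicopter": [
--         "attack helicopter",
--         "combat helicopter",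
--         "gunship helicopter",
--         "helicopter gunship",
--     ],
--     "military vehicle": [
--         "armored vehicle",
--         "armoured vehicle",
--         "armored car",
--         "armoured car",
--         "armored personnel carrier",
--         "armoured personnel carrier",
--         "apc",
--         "ifv",
--     ],
--     "tank": [
--         "main battle tank",
--         "mbt",
--         "armored tank",
--         "armoured tank",
--     ],
--     "artillery": [
--         "howitzer",
--         "self propelled gun",
--         "self-propelled gun",
--         "spg",
--     ],
--     "drone": [
--         "unmanned aerial vehicle",
--         "unmanned aircraft",
--         "uav",
--         "quadcopter",
--     ],
--     "military personnel": [
--         "soldier",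
--         "troop",
--         "troops",
--         "soldiers",
--         "infantry",
--         "marine",
--         "marines",
--         "crew",
--         "operator",
--         "gunner",
--         "pilot",
--     ],
--     "weapon": [
--         "machine gun",
--         "rifle",
--         "gun",
--         "cannon",
--     ],
--     "missile": [
--         "rocket",
--         "sam",
--         "surface to air missile",
--     ],
-- }
--
-- def _canonicalize_phrase(phrase: str) -> str:
--     phrase = phrase.strip()
--     if "carrier" in phrase and ("aircraft" in phrase or "naval" in phrase):
--         return "aircraft carrier"
--     if "fighter" in phrase and "jet" in phrase:
--         return "fighter jet"
--     for canonical, variants in SYNONYM_MAP.items():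
--         if phrase == canonical:
--             return canonical
--         for variant in variants:
--             if phrase == variant:
--                 return canonical
--     return phrase
-- ===== SOURCE B (Python) =====
-- SYNONYM_MAP = {
--     "aircraft carrier": [
--         "carrier ship",
--         "naval carrier",
--         "carrier vessel",
--         "aircraft-carrier",
--     ],
--     "warship": [
--         "naval ship",
--         "military ship",
--         "destroyer",
--         "frigate",
--         "battleship",
--     ],
--     "fighter jet": [
--         "fighter",
--         "fighter aircraft",
--         "combat aircraft",
--     ],
--     "military helicopter": [
--         "attack helicopter",
--         "combat helicopter",
--         "gunship helicopter",
--         "helicopter gunship",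
--     ],
--     "military vehicle": [
--         "armored vehicle",
--         "armoured vehicle",
--         "armored car",
--         "armoured car",
--         "armored personnel carrier",
--         "armoured personnel carrier",
--         "apc",
--         "ifv",
--     ],
--     "tank": [
--         "main battle tank",
--         "mbt",
--         "armored tank",
--         "armoured tank",
--     ],
--     "artillery": [
--         "howitzer",
--         "self propelled gun",
--         "self-propelled gun",
--         "spg",
--     ],
--     "drone": [
--         "unmanned aerial vehicle",
--         "unmanned aircraft",
--         "uav",
--         "quadcopter",
--     ],
--     "military personnel": [
--         "soldier",
--         "troop",
--         "troops",
--         "soldiers",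
--         "infantry",
--         "marine",
--         "marines",
--         "crew",
--         "operator",
--         "gunner",
--         "pilot",
--     ],
--     "weapon": [
--         "machine gun",
--         "rifle",
--         "gun",
--         "cannon",
--     ],
--     "missile": [
--         "rocket",
--         "sam",
--         "surface to air missile",
--     ],
-- }
--
-- # Sorted index built once: (key, canonical) pairs, keys = every canonical and
-- # every variant (all 65 keys are distinct), sorted by key for binary search.
-- _PAIRS = sorted(
--     [(k, c) for c, vs in SYNONYM_MAP.items() for k in [c] + vs],
--     key=lambda p: p[0],
-- )
--
-- def _canonicalize_phrase(phrase: str) -> str: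
--     phrase = phrase.strip()
--     if "carrier" in phrase and ("aircraft" in phrase or "naval" in phrase):
--         return "aircraft carrier"
--     if "fighter" in phrase and "jet" in phrase:
--         return "fighter jet"
--     # binary search over the sorted key index
--     lo, hi = 0, len(_PAIRS)
--     while lo < hi:
--         mid = (lo + hi) // 2
--         if _PAIRS[mid][0] < phrase:
--             lo = mid + 1
--         else:
--             hi = mid
--     if lo < len(_PAIRS) and _PAIRS[lo][0] == phrase:
--         return _PAIRS[lo][1]
--     return phrase
-- ===== Notes on version B (the rewrite author's own statement) =====
-- stated objective: alternative
-- what changed: A's per-call nested linear scan over SYNONYM_MAP (outer loop over canonicals, inner loop over variants) is replaced by a (key, canonical) index sorted once at module scope and a per-call binary search over it; all 65 keys are distinct so first-match order is irrelevant.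
import Mathlib
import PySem

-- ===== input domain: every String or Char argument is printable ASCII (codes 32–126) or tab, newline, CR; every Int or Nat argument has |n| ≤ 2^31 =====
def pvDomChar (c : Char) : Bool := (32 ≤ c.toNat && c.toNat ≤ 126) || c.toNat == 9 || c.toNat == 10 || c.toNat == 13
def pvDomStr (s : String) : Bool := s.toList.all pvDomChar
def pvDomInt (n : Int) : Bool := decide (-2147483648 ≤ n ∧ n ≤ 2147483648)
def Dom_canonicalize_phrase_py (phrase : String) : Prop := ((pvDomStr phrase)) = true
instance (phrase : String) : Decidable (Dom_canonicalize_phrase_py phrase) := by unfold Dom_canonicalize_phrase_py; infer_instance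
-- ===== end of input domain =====

-- B replaces A's per-call nested scan over SYNONYM_MAP by binary search in a (key, canonical) index sorted once at module scope (alternative; same results).

-- ===== PORT A =====
-- SYNONYM_MAP, in insertion order
def synMapA : List (String × List String) := [
  ("aircraft carrier", ["carrier ship", "naval carrier", "carrier vessel", "aircraft-carrier"]),
  ("warship", ["naval ship", "military ship", "destroyer", "frigate", "battleship"]),
  ("fighter jet", ["fighter", "fighter aircraft", "combat aircraft"]),
  ("military helicopter", ["attack helicopter", "combat helicopter", "gunship helicopter", "helicopter gunship"]),
  ("military vehicle", ["armored vehicle", "armoured vehicle", "armored car", "armoured car", "armored personnel carrier", "armoured personnel carrier", "apc", "ifv"]),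
  ("tank", ["main battle tank", "mbt", "armored tank", "armoured tank"]),
  ("artillery", ["howitzer", "self propelled gun", "self-propelled gun", "spg"]),
  ("drone", ["unmanned aerial vehicle", "unmanned aircraft", "uav", "quadcopter"]),
  ("military personnel", ["soldier", "troop", "troops", "soldiers", "infantry", "marine", "marines", "crew", "operator", "gunner", "pilot"]),
  ("weapon", ["machine gun", "rifle", "gun", "cannon"]),
  ("missile", ["rocket", "sam", "surface to air missile"])
]

-- inner loop: `for variant in variants: if phrase == variant: return canonical`
def innerA (p : String) : List String → Bool
  | [] => false
  | v :: vs => if p == v then true else innerA p vs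

-- outer loop over SYNONYM_MAP.items() with early returns
def loopA (p : String) : List (String × List String) → String
  | [] => p
  | (c, vs) :: rest => if p == c then c else if innerA p vs then c else loopA p rest

def canonicalize_phrase_py (phrase : String) : String :=
  let p := PySem.Str.strip phrase
  if PySem.Str.isIn "carrier" p && (PySem.Str.isIn "aircraft" p || PySem.Str.isIn "naval" p) then "aircraft carrier"
  else if PySem.Str.isIn "fighter" p && PySem.Str.isIn "jet" p then "fighter jet"
  else loopA p synMapA

-- ===== PORT B =====
-- [(k, c) for c, vs in SYNONYM_MAP.items() for k in [c] + vs]  (SYNONYM_MAP literal shared with port A)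
def flatPairsB : List (String × String) :=
  synMapA.flatMap (fun cv => ([cv.1] ++ cv.2).map (fun k => (k, cv.1)))

-- _PAIRS = sorted(..., key=lambda p: p[0]) : the module-scope sorted index.
-- Python compares strings lexicographically by code point = Lean's order on List Char, hence the .toList key.
def pairsB : List (String × String) := PySem.List.sorted flatPairsB (fun q => q.1.toList) false

-- the return after the while loop: `if lo < len(_PAIRS) and _PAIRS[lo][0] == phrase: return _PAIRS[lo][1]; return phrase`
-- (the global _PAIRS is passed as the `pairs` argument)
def finalB (pairs : List (String × String)) (p : String) (lo : Nat) : String :=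
  if decide (lo < pairs.length) && ((pairs.getD lo ("", "")).1 == p) then (pairs.getD lo ("", "")).2
  else p

-- the `while lo < hi` binary-search loop; fuel 65 ≥ any possible iteration count, the fuel-0 arm is
-- unreachable; mid = (lo + hi) // 2 is written inline; `_PAIRS[mid][0] < phrase` compared as List Char (code-point order, exact)
def bsB (pairs : List (String × String)) (p : String) : Nat → Nat → Nat → String
  | 0, lo, _ => finalB pairs p lo
  | f + 1, lo, hi =>
    if lo < hi then
      if (pairs.getD ((lo + hi) / 2) ("", "")).1.toList < p.toList then bsB pairs p f ((lo + hi) / 2 + 1) hi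
      else bsB pairs p f lo ((lo + hi) / 2)
    else finalB pairs p lo

def canonicalize_phrase_py_alt (phrase : String) : String :=
  let p := PySem.Str.strip phrase
  if PySem.Str.isIn "carrier" p && (PySem.Str.isIn "aircraft" p || PySem.Str.isIn "naval" p) then "aircraft carrier"
  else if PySem.Str.isIn "fighter" p && PySem.Str.isIn "jet" p then "fighter jet"
  else bsB pairsB p 65 0 pairsB.length

-- ===== PRECONDITION & SPEC =====
def Spec_canonicalize_phrase_py (phrase : String) (out : String) : Prop := out = canonicalize_phrase_py_alt phrase
instance (phrase : String) (out : String) : Decidable (Spec_canonicalize_phrase_py phrase out) := by unfold Spec_canonicalize_phrase_py; infer_instance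

-- ===== CLAIM (what is proved, stated in full; the proofs are below) =====
def Claim_equal_canonicalize_phrase_py : Prop := ∀ (phrase : String), Dom_canonicalize_phrase_py phrase → Spec_canonicalize_phrase_py phrase (canonicalize_phrase_py phrase)

-- ===== LEMMAS AND PROOFS =====

-- when p matches no key, the final check of the binary search fails and p itself is returned
theorem finalB_nomatch (pairs : List (String × String)) (p : String)
    (h : ∀ q ∈ pairs, q.1 ≠ p) (lo : Nat) : finalB pairs p lo = p := by
  unfold finalB
  by_cases hlo : lo < pairs.length
  · have hne := h pairs[lo] (List.getElem_mem hlo)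
    simp [hlo, hne]
  · simp [hlo]

theorem bsB_nomatch (pairs : List (String × String)) (p : String)
    (h : ∀ q ∈ pairs, q.1 ≠ p) : ∀ (f lo hi : Nat), bsB pairs p f lo hi = p := by
  intro f
  induction f with
  | zero => intro lo hi; exact finalB_nomatch pairs p h lo
  | succ f ih =>
    intro lo hi
    unfold bsB
    split
    · split
      · exact ih _ _
      · exact ih _ _
    · exact finalB_nomatch pairs p h lo

theorem innerA_nomatch (p : String) (vs : List String) (h : ∀ v ∈ vs, p ≠ v) : innerA p vs = false := by
  induction vs with
  | nil => rfl
  | cons v vs ih =>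
    unfold innerA
    have hv : (p == v) = false := by simp [h v (by simp)]
    simp [hv]
    exact ih (fun x hx => h x (by simp [hx]))

theorem loopA_nomatch (p : String) (l : List (String × List String))
    (h : ∀ cv ∈ l, p ≠ cv.1 ∧ ∀ v ∈ cv.2, p ≠ v) : loopA p l = p := by
  induction l with
  | nil => rfl
  | cons cv rest ih =>
    obtain ⟨c, vs⟩ := cv
    obtain ⟨hc, hvs⟩ := h (c, vs) (by simp)
    unfold loopA
    simp [hc, innerA_nomatch p vs hvs]
    exact ih (fun x hx => h x (by simp [hx]))

-- the full key set, in insertion order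
theorem keys_literal : flatPairsB.map Prod.fst = ["aircraft carrier", "carrier ship", "naval carrier", "carrier vessel", "aircraft-carrier", "warship", "naval ship", "military ship", "destroyer", "frigate", "battleship", "fighter jet", "fighter", "fighter aircraft", "combat aircraft", "military helicopter", "attack helicopter", "combat helicopter", "gunship helicopter", "helicopter gunship", "military vehicle", "armored vehicle", "armoured vehicle", "armored car", "armoured car", "armored personnel carrier", "armoured personnel carrier", "apc", "ifv", "tank", "main battle tank", "mbt", "armored tank", "armoured tank", "artillery", "howitzer", "self propelled gun", "self-propelled gun", "spg", "drone", "unmanned aerial vehicle", "unmanned aircraft", "uav", "quadcopter", "military personnel", "soldier", "troop", "troops", "soldiers", "infantry", "marine", "marines", "crew", "operator", "gunner", "pilot", "weapon", "machine gun", "rifle", "gun", "cannon", "missile", "rocket", "sam", "surface to air missile"] := by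
  decide

-- the sorted index, evaluated once
set_option maxRecDepth 100000 in
set_option maxHeartbeats 2000000 in
theorem pairsB_literal : pairsB = [("aircraft carrier", "aircraft carrier"), ("aircraft-carrier", "aircraft carrier"), ("apc", "military vehicle"), ("armored car", "military vehicle"), ("armored personnel carrier", "military vehicle"), ("armored tank", "tank"), ("armored vehicle", "military vehicle"), ("armoured car", "military vehicle"), ("armoured personnel carrier", "military vehicle"), ("armoured tank", "tank"), ("armoured vehicle", "military vehicle"), ("artillery", "artillery"), ("attack helicopter", "military helicopter"), ("battleship", "warship"), ("cannon", "weapon"), ("carrier ship", "aircraft carrier"), ("carrier vessel", "aircraft carrier"), ("combat aircraft", "fighter jet"), ("combat helicopter", "military helicopter"), ("crew", "military personnel"), ("destroyer", "warship"), ("drone", "drone"), ("fighter", "fighter jet"), ("fighter aircraft", "fighter jet"), ("fighter jet", "fighter jet"), ("frigate", "warship"), ("gun", "weapon"), ("gunner", "military personnel"), ("gunship helicopter", "military helicopter"), ("helicopter gunship", "military helicopter"), ("howitzer", "artillery"), ("ifv", "military vehicle"), ("infantry", "military personnel"), ("machine gun", "weapon"), ("main battle tank", "tank"), ("marine", "military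 personnel"), ("marines", "military personnel"), ("mbt", "tank"), ("military helicopter", "military helicopter"), ("military personnel", "military personnel"), ("military ship", "warship"), ("military vehicle", "military vehicle"), ("missile", "missile"), ("naval carrier", "aircraft carrier"), ("naval ship", "warship"), ("operator", "military personnel"), ("pilot", "military personnel"), ("quadcopter", "drone"), ("rifle", "weapon"), ("rocket", "missile"), ("sam", "missile"), ("self propelled gun", "artillery"), ("self-propelled gun", "artillery"), ("soldier", "military personnel"), ("soldiers", "military personnel"), ("spg", "artillery"), ("surface to air missile", "missile"), ("tank", "tank"), ("troop", "military personnel"), ("troops", "military personnel"), ("uav", "drone"), ("unmanned aerial vehicle", "drone"), ("unmanned aircraft", "drone"), ("warship", "warship"), ("weapon", "weapon")] := by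
  decide

-- A's scan of SYNONYM_MAP and B's binary search in the sorted index agree on every string
set_option maxRecDepth 100000 in
set_option maxHeartbeats 4000000 in
theorem loop_eq_bs (p : String) : loopA p synMapA = bsB pairsB p 65 0 pairsB.length := by
  rw [pairsB_literal]
  by_cases hmem : p ∈ flatPairsB.map Prod.fst
  · rw [keys_literal] at hmem
    fin_cases hmem <;> decide
  · have hkeys : ∀ q ∈ ([("aircraft carrier", "aircraft carrier"), ("aircraft-carrier", "aircraft carrier"), ("apc", "military vehicle"), ("armored car", "military vehicle"), ("armored personnel carrier", "military vehicle"), ("armored tank", "tank"), ("armored vehicle", "military vehicle"), ("armoured car", "military vehicle"), ("armoured personnel carrier", "military vehicle"), ("armoured tank", "tank"), ("armoured vehicle", "military vehicle"), ("artillery", "artillery"), ("attack helicopter", "military helicopter"), ("battleship", "warship"), ("cannon", "weapon"), ("carrier ship", "aircraft carrier"), ("carrier vessel", "aircraft carrier"), ("combat aircraft", "fighter jet"), ("combat helicopter", "military helicopter"), ("crew", "military personnel"), ("destroyer", "warship"), ("drone", "drone"), ("fighter", "fighter jet"), ("fighter aircraft", "fighter jet"), ("fighter jet", "fighter jet"),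 ("frigate", "warship"), ("gun", "weapon"), ("gunner", "military personnel"), ("gunship helicopter", "military helicopter"), ("helicopter gunship", "military helicopter"), ("howitzer", "artillery"), ("ifv", "military vehicle"), ("infantry", "military personnel"), ("machine gun", "weapon"), ("main battle tank", "tank"), ("marine", "military personnel"), ("marines", "military personnel"), ("mbt", "tank"), ("military helicopter", "military helicopter"), ("military personnel", "military personnel"), ("military ship", "warship"), ("military vehicle", "military vehicle"), ("missile", "missile"), ("naval carrier", "aircraft carrier"), ("naval ship", "warship"), ("operator", "military personnel"), ("pilot", "military personnel"), ("quadcopter", "drone"), ("rifle", "weapon"), ("rocket", "missile"), ("sam", "missile"), ("self propelled gun", "artillery"), ("self-propelled gun", "artillery"), ("soldier", "military personnel"), ("soldiers", "military personnel"), ("spg", "artillery"), ("surface to air missile", "missile"), ("tank", "tank"), ("troop", "military personnel"), ("troops", "military personnel"), ("uav", "drone"), ("unmanned aerial vehicle", "drone"), ("unmanned aircraft", "drone"), ("warship", "warship"), ("weapon", "weapon")] : List (String × String)), q.1 ≠ p := by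
      intro q hq he
      have hq' : q ∈ pairsB := by rw [pairsB_literal]; exact hq
      exact hmem (he ▸ List.mem_map_of_mem ((PySem.List.mem_sorted flatPairsB _ false q).mp hq'))
    have hsyn : ∀ cv ∈ synMapA, p ≠ cv.1 ∧ ∀ v ∈ cv.2, p ≠ v := by
      intro cv hcv
      constructor
      · intro he
        subst he
        have h1 : (cv.1, cv.1) ∈ flatPairsB := by
          unfold flatPairsB
          exact List.mem_flatMap.mpr ⟨cv, hcv, List.mem_map_of_mem (List.mem_append_left _ (List.mem_singleton.mpr rfl))⟩
        exact hmem (List.mem_map_of_mem h1)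
      · intro v hv he
        subst he
        have h1 : (p, cv.1) ∈ flatPairsB := by
          unfold flatPairsB
          exact List.mem_flatMap.mpr ⟨cv, hcv, List.mem_map_of_mem (List.mem_append_right _ hv)⟩
        exact hmem (List.mem_map_of_mem h1)
    rw [loopA_nomatch p synMapA hsyn, bsB_nomatch _ p hkeys]

-- ===== VERDICT (by name: the statement is the Claim_ definition above) =====
theorem canonicalize_phrase_py_spec : Claim_equal_canonicalize_phrase_py := by
  intro phrase _
  unfold Spec_canonicalize_phrase_py canonicalize_phrase_py canonicalize_phrase_py_alt
  simp only [loop_eq_bs]
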